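-- pv_equiv track=rewrite | github.com/esvanmantgem/refine | src/full_model_ilp.py | create_b
-- ===== SOURCE A (Python) =====
-- def create_b(max_size):
--     b = []
--     b_sum = []
--     b.append([])
--     b.append([[0],[1]])
--     b_sum.append([])
--     b_sum.append([ 0, 1])
--
--     for size in range(2,max_size+1):
--         size_b = []
--         sum_row_b = []
--         for row in range(pow(2, size)):
--             bin_rep = "{0:b}".format(row)
--             bin_rep = bin_rep.zfill(size)
--             row_values = []
--             for element in bin_rep:
--                 row_values.append(int(element))
--             size_b.append(row_values)
--             sum_row_b.append(sum(row_values))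
--         b_sum.append(sum_row_b)
--         b.append(size_b)
--     return (b, b_sum)
-- ===== SOURCE B (Python) =====
-- def create_b(max_size):
--     rows = [[0], [1]]
--     sums = [0, 1]
--     b = [[], rows]
--     b_sum = [[], sums]
--     for _ in range(2, max_size + 1):
--         rows = [[0] + r for r in rows] + [[1] + r for r in rows]
--         sums = sums + [s + 1 for s in sums]
--         b.append(rows)
--         b_sum.append(sums)
--     return (b, b_sum)
-- ===== Notes on version B (the rewrite author's own statement) =====
-- stated objective: alternative
-- what changed: B builds each level by doubling the previous one (prepend 0 to every row, then prepend 1; sums reused with +1) instead of formatting every integer as a zero-filled binary string and re-parsing its characters.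
import Mathlib
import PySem

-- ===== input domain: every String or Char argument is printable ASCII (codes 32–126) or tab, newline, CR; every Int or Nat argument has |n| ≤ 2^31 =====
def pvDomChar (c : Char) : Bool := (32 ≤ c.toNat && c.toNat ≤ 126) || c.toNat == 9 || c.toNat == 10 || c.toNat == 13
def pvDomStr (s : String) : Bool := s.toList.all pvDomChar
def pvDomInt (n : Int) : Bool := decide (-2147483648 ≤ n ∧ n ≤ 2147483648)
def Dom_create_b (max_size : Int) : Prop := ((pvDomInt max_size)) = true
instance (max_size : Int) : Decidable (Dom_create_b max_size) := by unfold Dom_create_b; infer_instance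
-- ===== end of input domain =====

-- B replaces per-row binary-string formatting/parsing by doubling the previous level (prepend 0 then 1, reuse sums with +1): a different construction of the same tables.

-- ===== PORT A =====
-- int(element) for a single char; for the '0'/'1' chars A feeds it, ofChars? is always some
def pyIntChar (c : Char) : Int := (PySem.Int.ofChars? [c]).getD 0

def create_b (max_size : Int) : List (List (List Int)) × List (List Int) :=
  -- b = []; b_sum = []; the four appends:
  let b : List (List (List Int)) := [[], [[0], [1]]]
  let b_sum : List (List Int) := [[], [0, 1]]
  (PySem.List.pyRange 2 (max_size + 1) 1).foldl
    (fun st size =>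
      -- pow(2, size): size ≥ 2 inside the loop, so 2 ^ size.toNat is exact
      let inner := (PySem.List.pyRange 0 ((2 : Int) ^ size.toNat) 1).foldl
        (fun (p : List (List Int) × List Int) row =>
          let bin_rep := PySem.Int.toBinChars row                -- "{0:b}".format(row)
          let bin_rep := PySem.Chars.zfill bin_rep size          -- .zfill(size)
          let row_values := bin_rep.foldl (fun acc element => acc ++ [pyIntChar element]) []
          (p.1 ++ [row_values], p.2 ++ [row_values.sum]))
        ([], [])
      (st.1 ++ [inner.1], st.2 ++ [inner.2]))
    (b, b_sum)

-- ===== PORT B =====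
def create_b_alt (max_size : Int) : List (List (List Int)) × List (List Int) :=
  let rows : List (List Int) := [[0], [1]]
  let sums : List Int := [0, 1]
  let st : List (List Int) × List Int × List (List (List Int)) × List (List Int) :=
    (rows, sums, [[], rows], [[], sums])
  let r := (PySem.List.pyRange 2 (max_size + 1) 1).foldl
    (fun (st : List (List Int) × List Int × List (List (List Int)) × List (List Int)) _ =>
      let rows := st.1.map (fun r => 0 :: r) ++ st.1.map (fun r => 1 :: r)
      let sums := st.2.1 ++ (st.2.1).map (fun s => s + 1)
      (rows, sums, st.2.2.1 ++ [rows], st.2.2.2 ++ [sums]))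
    st
  (r.2.2.1, r.2.2.2)

-- ===== PRECONDITION & SPEC =====
def Spec_create_b (max_size : Int) (out : List (List (List Int)) × List (List Int)) : Prop := out = create_b_alt max_size
instance (max_size : Int) (out : List (List (List Int)) × List (List Int)) : Decidable (Spec_create_b max_size out) := by unfold Spec_create_b; infer_instance

-- ===== CLAIM (what is proved, stated in full; the proofs are below) =====
def Claim_equal_create_b : Prop := ∀ (max_size : Int), Dom_create_b max_size → Spec_create_b max_size (create_b max_size)

-- ===== LEMMAS AND PROOFS =====

-- A's row for value r at width n, and the whole level
def Arow (n : Nat) (r : Nat) : List Int :=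
  (PySem.Chars.zfill (PySem.Int.toBinChars (r : Int)) (n : Int)).map pyIntChar
def rowsA (n : Nat) : List (List Int) := (List.range (2 ^ n)).map (Arow n)
def sumsA (n : Nat) : List Int := (rowsA n).map List.sum

-- n-bit big-endian binary digits of r (for r < 2^n)
def pbits : Nat → Nat → List Char
  | 0, _ => []
  | n + 1, r => pbits n (r / 2) ++ [Nat.digitChar (r % 2)]

theorem pbits_len (n r : Nat) : (pbits n r).length = n := by
  induction n generalizing r with
  | zero => rfl
  | succ n ih => simp [pbits, ih]

theorem pbits_zero (n : Nat) : pbits n 0 = List.replicate n '0' := by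
  induction n with
  | zero => rfl
  | succ n ih =>
    rw [pbits, ih]
    norm_num [Nat.digitChar, List.replicate_succ']

theorem digits01 (r : Nat) : ∀ c ∈ Nat.toDigits 2 r, c = '0' ∨ c = '1' := by
  induction r using Nat.strong_induction_on with
  | _ r ih =>
    intro c hc
    rw [Nat.toDigits_eq_if (by norm_num)] at hc
    by_cases h : r < 2
    · simp [h] at hc; subst hc; interval_cases r <;> simp [Nat.digitChar]
    · simp [h] at hc
      rcases hc with hc | hc
      · exact ih (r / 2) (by omega) c hc
      · subst hc
        rcases Nat.mod_two_eq_zero_or_one r with h2 | h2 <;> simp [h2, Nat.digitChar]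

theorem toDigits_ne_nil (r : Nat) : Nat.toDigits 2 r ≠ [] := by
  rw [Nat.toDigits_eq_if (by norm_num)]
  split <;> simp

theorem toBinChars_natCast (r : Nat) : PySem.Int.toBinChars (r : Int) = Nat.toDigits 2 r := by
  simp [PySem.Int.toBinChars]

theorem zfillD (r w : Nat) :
    PySem.Chars.zfill (Nat.toDigits 2 r) ((w : Nat) : Int)
      = List.replicate (w - (Nat.toDigits 2 r).length) '0' ++ Nat.toDigits 2 r := by
  rcases h : Nat.toDigits 2 r with _ | ⟨c, rest⟩
  · exact absurd h (toDigits_ne_nil r)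
  have hc : c = '0' ∨ c = '1' := digits01 r c (by rw [h]; exact List.mem_cons_self)
  by_cases hw : (w : Int) ≤ ((rest.length : Int) + 1)
  · have hwn : w ≤ rest.length + 1 := by exact_mod_cast hw
    simp [PySem.Chars.zfill, hw, show w - (rest.length + 1) = 0 by omega]
  · have hne : ¬(c = '+' ∨ c = '-') := by rcases hc with hc | hc <;> subst hc <;> decide
    simp [PySem.Chars.zfill, hw, hne]

theorem toDigits_pow_add (n : Nat) : ∀ r, r < 2 ^ n → Nat.toDigits 2 (2 ^ n + r) = '1' :: pbits n r := by
  induction n with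
  | zero =>
    intro r hr
    interval_cases r
    decide
  | succ n ih =>
    intro r hr
    have h2 : 2 ^ (n + 1) = 2 * 2 ^ n := by ring
    rw [Nat.toDigits_eq_if (by norm_num), if_neg (by omega)]
    have hdiv : (2 ^ (n + 1) + r) / 2 = 2 ^ n + r / 2 := by omega
    have hmod : (2 ^ (n + 1) + r) % 2 = r % 2 := by omega
    rw [hdiv, hmod, ih (r / 2) (by omega)]
    rfl

theorem pbits_eq_pad (n : Nat) : ∀ r, 1 ≤ n → r < 2 ^ n →
    pbits n r = List.replicate (n - (Nat.toDigits 2 r).length) '0' ++ Nat.toDigits 2 r := by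
  induction n using Nat.strong_induction_on with
  | _ n ih =>
    intro r h1 hr
    match n, h1 with
    | 1, _ =>
      interval_cases r <;> decide
    | (m + 2), _ =>
      by_cases h : r < 2
      · have hr2 : r / 2 = 0 := by omega
        rw [pbits, hr2, pbits_zero, Nat.toDigits_of_lt_base h]
        have : r % 2 = r := by omega
        simp [this, - List.replicate_succ']
      · have hlt : r / 2 < 2 ^ (m + 1) := by
          have : 2 ^ (m + 2) = 2 * 2 ^ (m + 1) := by ring
          omega
        rw [pbits, ih (m + 1) (by omega) (r / 2) (by omega) hlt,
          Nat.toDigits_eq_if (b := 2) (n := r) (by norm_num), if_neg h]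
        rw [← List.append_assoc]
        congr 2
        simp

theorem len_toDigits_le (n r : Nat) (h1 : 1 ≤ n) (hr : r < 2 ^ n) :
    (Nat.toDigits 2 r).length ≤ n :=
  Nat.toDigits_length 2 r n h1 hr

theorem zfill_lo (n r : Nat) (h1 : 1 ≤ n) (hr : r < 2 ^ n) :
    PySem.Chars.zfill (Nat.toDigits 2 r) ((n : Int) + 1)
      = '0' :: PySem.Chars.zfill (Nat.toDigits 2 r) (n : Int) := by
  have hcast : ((n : Int) + 1) = ((n + 1 : Nat) : Int) := by push_cast; ring
  rw [hcast, zfillD, zfillD]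
  have hle := len_toDigits_le n r h1 hr
  have : n + 1 - (Nat.toDigits 2 r).length = (n - (Nat.toDigits 2 r).length) + 1 := by omega
  rw [this, List.replicate_succ, List.cons_append]

theorem zfill_hi (n r : Nat) (h1 : 1 ≤ n) (hr : r < 2 ^ n) :
    PySem.Chars.zfill (Nat.toDigits 2 (2 ^ n + r)) ((n : Int) + 1)
      = '1' :: PySem.Chars.zfill (Nat.toDigits 2 r) (n : Int) := by
  have hcast : ((n : Int) + 1) = ((n + 1 : Nat) : Int) := by push_cast; ring
  have hlen : (Nat.toDigits 2 (2 ^ n + r)).length = n + 1 := by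
    rw [toDigits_pow_add n r hr]
    simp [pbits_len]
  rw [hcast, zfillD, zfillD, hlen, Nat.sub_self, List.replicate_zero, List.nil_append,
    toDigits_pow_add n r hr, pbits_eq_pad n r h1 hr]

theorem Arow_lo (n r : Nat) (h1 : 1 ≤ n) (hr : r < 2 ^ n) :
    Arow (n + 1) r = 0 :: Arow n r := by
  unfold Arow
  rw [toBinChars_natCast]
  have hcast : ((n + 1 : Nat) : Int) = (n : Int) + 1 := by push_cast; ring
  rw [hcast, zfill_lo n r h1 hr, List.map_cons]
  rfl

theorem Arow_hi (n r : Nat) (h1 : 1 ≤ n) (hr : r < 2 ^ n) :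
    Arow (n + 1) (2 ^ n + r) = 1 :: Arow n r := by
  unfold Arow
  rw [toBinChars_natCast, toBinChars_natCast]
  have hcast : ((n + 1 : Nat) : Int) = (n : Int) + 1 := by push_cast; ring
  rw [hcast, zfill_hi n r h1 hr, List.map_cons]
  rfl

theorem rowsA_double (n : Nat) (h1 : 1 ≤ n) :
    rowsA (n + 1) = (rowsA n).map (fun r => 0 :: r) ++ (rowsA n).map (fun r => 1 :: r) := by
  unfold rowsA
  have h2 : 2 ^ (n + 1) = 2 ^ n + 2 ^ n := by ring
  rw [h2, List.range_add, List.map_append, List.map_map, List.map_map, List.map_map]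
  congr 1
  · exact List.map_congr_left (fun r hr => Arow_lo n r h1 (List.mem_range.mp hr))
  · exact List.map_congr_left (fun r hr => Arow_hi n r h1 (List.mem_range.mp hr))

theorem sumsA_double (n : Nat) (h1 : 1 ≤ n) :
    sumsA (n + 1) = sumsA n ++ (sumsA n).map (fun s => s + 1) := by
  unfold sumsA
  rw [rowsA_double n h1, List.map_append, List.map_map, List.map_map, List.map_map]
  congr 1
  · apply List.map_congr_left; intro r _; simp
  · apply List.map_congr_left; intro r _; simp [Int.add_comm]

theorem inner_eq (n : Nat) :
    (PySem.List.pyRange 0 ((2 : Int) ^ ((n : Int)).toNat) 1).foldl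
      (fun (p : List (List Int) × List Int) row =>
        let bin_rep := PySem.Int.toBinChars row
        let bin_rep := PySem.Chars.zfill bin_rep (n : Int)
        let row_values := bin_rep.foldl (fun acc element => acc ++ [pyIntChar element]) []
        (p.1 ++ [row_values], p.2 ++ [row_values.sum])) ([], [])
      = (rowsA n, sumsA n) := by
  have hpow : ((2 : Int) ^ ((n : Int)).toNat) = ((2 ^ n : Nat) : Int) := by
    simp
  rw [hpow, PySem.List.pyRange_zero_natCast, List.foldl_map]
  simp only [PySem.List.foldl_append_singleton_eq_map, List.nil_append]
  rw [PySem.List.foldl_prod_mk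
      (fun acc (row : Nat) => acc ++ [((PySem.Chars.zfill (PySem.Int.toBinChars (row : Int)) (n : Int)).map pyIntChar)])
      (fun acc (row : Nat) => acc ++ [((PySem.Chars.zfill (PySem.Int.toBinChars (row : Int)) (n : Int)).map pyIntChar).sum])]
  simp only [PySem.List.foldl_append_singleton_eq_map, List.nil_append]
  simp only [sumsA, rowsA, List.map_map]
  rfl

-- state after k iterations of the outer loop
def bPred (k : Nat) : List (List (List Int)) :=
  [[], [[0], [1]]] ++ (List.range k).map (fun i => rowsA (i + 2))
def sPred (k : Nat) : List (List Int) :=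
  [[], [0, 1]] ++ (List.range k).map (fun i => sumsA (i + 2))

theorem main_fold (k : Nat) :
    ((PySem.List.pyRange 2 (2 + (k : Int)) 1).foldl
      (fun (st : List (List (List Int)) × List (List Int)) size =>
        let inner := (PySem.List.pyRange 0 ((2 : Int) ^ size.toNat) 1).foldl
          (fun (p : List (List Int) × List Int) row =>
            let bin_rep := PySem.Int.toBinChars row
            let bin_rep := PySem.Chars.zfill bin_rep size
            let row_values := bin_rep.foldl (fun acc element => acc ++ [pyIntChar element]) []
            (p.1 ++ [row_values], p.2 ++ [row_values.sum]))
          ([], [])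
        (st.1 ++ [inner.1], st.2 ++ [inner.2]))
      ([[], [[0], [1]]], [[], [0, 1]])
      = (bPred k, sPred k))
    ∧ ((PySem.List.pyRange 2 (2 + (k : Int)) 1).foldl
      (fun (st : List (List Int) × List Int × List (List (List Int)) × List (List Int)) _ =>
        let rows := st.1.map (fun r => 0 :: r) ++ st.1.map (fun r => 1 :: r)
        let sums := st.2.1 ++ (st.2.1).map (fun s => s + 1)
        (rows, sums, st.2.2.1 ++ [rows], st.2.2.2 ++ [sums]))
      ([[0], [1]], [0, 1], [[], [[0], [1]]], [[], [0, 1]])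
      = (rowsA (k + 1), sumsA (k + 1), bPred k, sPred k)) := by
  induction k with
  | zero =>
    rw [PySem.List.pyRange_one_eq_nil (by norm_num)]
    constructor
    · rfl
    · decide
  | succ k ih =>
    have hsplit : (2 + ((k : Int) + 1)) = (2 + (k : Int)) + 1 := by ring
    have hrange : PySem.List.pyRange 2 (2 + ((k + 1 : Nat) : Int)) 1
        = PySem.List.pyRange 2 (2 + (k : Int)) 1 ++ [2 + (k : Int)] := by
      push_cast
      rw [hsplit]
      exact PySem.List.pyRange_one_succ_right (by omega)
    rw [hrange, List.foldl_append, List.foldl_append, ih.1, ih.2]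
    simp only [List.foldl_cons, List.foldl_nil]
    have hsize : (2 + (k : Int)) = ((k + 2 : Nat) : Int) := by push_cast; ring
    constructor
    · rw [hsize, inner_eq (k + 2)]
      unfold bPred sPred
      simp [List.range_succ]
    · have h1 : 1 ≤ k + 1 := by omega
      have hrows : rowsA (k + 1 + 1) = (rowsA (k + 1)).map (fun r => 0 :: r) ++ (rowsA (k + 1)).map (fun r => 1 :: r) :=
        rowsA_double (k + 1) h1
      have hsums : sumsA (k + 1 + 1) = sumsA (k + 1) ++ (sumsA (k + 1)).map (fun s => s + 1) :=
        sumsA_double (k + 1) h1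
      rw [← hrows, ← hsums]
      unfold bPred sPred
      have hk2 : k + 1 + 1 = k + 2 := by omega
      simp [List.range_succ, hk2]

-- ===== VERDICT (by name: the statement is the Claim_ definition above) =====
theorem create_b_spec : Claim_equal_create_b := by
  intro max_size _
  unfold Spec_create_b create_b create_b_alt
  by_cases h : max_size ≤ 1
  · rw [PySem.List.pyRange_one_eq_nil (by omega)]
    rfl
  · have hk : max_size + 1 = 2 + ((max_size - 1).toNat : Int) := by omega
    rw [hk]
    obtain ⟨hA, hB⟩ := main_fold (max_size - 1).toNat
    exact hA.trans (congrArg (fun r => (r.2.2.1, r.2.2.2)) hB).symm
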